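-- pv_equiv track=rewrite | github.com/HannahLo/puzzle | foobar/2-b/solution.py | solution
-- ===== SOURCE A (Python) =====
-- def solution(xs):
--     positive = []
--     negative = []
--     has_zero = False
--
--     for num in xs:
--         if num > 0:
--             positive.append(num)
--         elif num < 0:
--             negative.append(num)
--         else:
--             has_zero = True
--
--     if len(positive) == 0 and len(negative) == 0:
--         return '0'
--     elif len(positive) == 0 and len(negative) == 1:
--         if has_zero:
--             return '0'
--         else:
--             return str(negative[0])
--
--     if len(negative) % 2 != 0:
--         negative.sort()
--         negative = negative[:len(negative)-1]
--
--     result = 1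
--     for num in positive + negative:
--         result *= num
--
--     return str(result)
-- ===== SOURCE B (Python) =====
-- def solution(xs):
--     # One pass: product of all nonzero numbers, count of negatives, max negative,
--     # flags for positives/zeros; if the negative count is odd, divide out the
--     # largest (closest-to-zero) negative with exact integer division.
--     total = 1
--     neg_count = 0
--     max_neg = None
--     has_pos = False
--     has_zero = False
--     for num in xs:
--         if num == 0:
--             has_zero = True
--         else:
--             total *= num
--             if num < 0:
--                 neg_count += 1
--                 if max_neg is None or num > max_neg:
--                     max_neg = num
--             else:
--                 has_pos = True
--     if not has_pos and neg_count == 0: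
--         return '0'
--     if not has_pos and neg_count == 1:
--         return '0' if has_zero else str(max_neg)
--     if neg_count % 2 != 0:
--         total //= max_neg
--     return str(total)
-- ===== Notes on version B (the rewrite author's own statement) =====
-- stated objective: alternative
-- what changed: B replaces A's partition-into-lists, sort-and-slice, then multiply over a concatenated list by a single accumulation pass that keeps the running product of all nonzero numbers, the negative count and the maximum negative, and corrects an odd negative count by one exact integer division by that maximum instead of sorting and dropping an element before multiplying.
import Mathlib
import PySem

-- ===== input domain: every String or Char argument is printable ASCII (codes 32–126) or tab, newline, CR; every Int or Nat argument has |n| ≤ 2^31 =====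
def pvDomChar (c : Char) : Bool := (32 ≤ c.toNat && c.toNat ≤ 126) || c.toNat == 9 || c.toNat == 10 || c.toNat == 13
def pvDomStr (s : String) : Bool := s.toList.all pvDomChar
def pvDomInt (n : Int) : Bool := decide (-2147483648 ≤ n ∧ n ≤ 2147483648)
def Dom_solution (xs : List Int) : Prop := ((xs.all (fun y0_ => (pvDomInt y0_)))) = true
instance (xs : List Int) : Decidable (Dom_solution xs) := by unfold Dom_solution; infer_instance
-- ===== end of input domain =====

-- B recomputes the kept-subset product in one pass (full nonzero product, then exact
-- integer division by the largest negative when the negative count is odd) instead of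
-- A's partition-into-lists, sort and slice; equivalence of return values is proved below.

-- ===== PORT A =====
-- loop body of A's partition loop
def aStep (s : List Int × List Int × Bool) (num : Int) : List Int × List Int × Bool :=
  if num > 0 then (s.1 ++ [num], s.2.1, s.2.2)
  else if num < 0 then (s.1, s.2.1 ++ [num], s.2.2)
  else (s.1, s.2.1, true)

def solution (xs : List Int) : String :=
  let st := xs.foldl aStep ([], [], false)
  let positive := st.1
  let negative := st.2.1
  let hasZero := st.2.2
  if positive.length = 0 ∧ negative.length = 0 then "0"
  else if positive.length = 0 ∧ negative.length = 1 then
    if hasZero then "0"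
    else PySem.Int.toStr (PySem.List.pyGetD negative 0 0)  -- negative[0]; index in range (length = 1 here)
  else
    let negative2 :=
      if PySem.Int.mod (negative.length : Int) 2 ≠ 0 then
        -- negative.sort(); negative = negative[:len(negative)-1]
        PySem.List.slice (PySem.List.sorted negative (fun x => x) false) none
          (some ((negative.length : Int) - 1))
      else negative
    PySem.Int.toStr ((positive ++ negative2).foldl (fun r num => r * num) 1)

-- ===== PORT B =====
-- loop body of B's single accumulation pass: (total, neg_count, max_neg, has_pos, has_zero)
def bStep (s : Int × Int × Option Int × Bool × Bool) (num : Int) :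
    Int × Int × Option Int × Bool × Bool :=
  if num = 0 then (s.1, s.2.1, s.2.2.1, s.2.2.2.1, true)
  else if num < 0 then
    (s.1 * num, s.2.1 + 1,
     (match s.2.2.1 with
      | none => some num
      | some m => if num > m then some num else some m),
     s.2.2.2.1, s.2.2.2.2)
  else (s.1 * num, s.2.1, s.2.2.1, true, s.2.2.2.2)

def solution_alt (xs : List Int) : String :=
  let st := xs.foldl bStep (1, 0, none, false, false)
  let total := st.1
  let negCount := st.2.1
  let maxNeg := st.2.2.1
  let hasPos := st.2.2.2.1
  let hasZero := st.2.2.2.2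
  if hasPos = false ∧ negCount = 0 then "0"
  else if hasPos = false ∧ negCount = 1 then
    if hasZero then "0" else PySem.Int.toStr (maxNeg.getD 0)  -- max_neg is set here (neg_count = 1)
  else if PySem.Int.mod negCount 2 ≠ 0 then
    match maxNeg with
    | some m => PySem.Int.toStr (PySem.Int.floordiv total m)
    | none => ""  -- unreachable: neg_count odd implies max_neg is set
  else PySem.Int.toStr total

-- ===== PRECONDITION & SPEC =====
def Spec_solution (xs : List Int) (out : String) : Prop := out = solution_alt xs
instance (xs : List Int) (out : String) : Decidable (Spec_solution xs out) := by unfold Spec_solution; infer_instance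

-- ===== CLAIM (what is proved, stated in full; the proofs are below) =====
def Claim_equal_solution : Prop := ∀ (xs : List Int), Dom_solution xs → Spec_solution xs (solution xs)

-- ===== LEMMAS AND PROOFS =====

-- the running max of B's loop
def mupd (o : Option Int) (num : Int) : Option Int :=
  match o with
  | none => some num
  | some m => if num > m then some num else some m

lemma aFold (xs : List Int) : ∀ p n b,
    xs.foldl aStep (p, n, b) =
      (p ++ xs.filter (fun x => decide (0 < x)),
       n ++ xs.filter (fun x => decide (x < 0)),
       b || xs.any (fun x => x == 0)) := by
  induction xs with
  | nil => intro p n b; simp [aStep]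
  | cons x t ih =>
    intro p n b
    rw [List.foldl_cons]
    rcases lt_trichotomy x 0 with hx | hx | hx
    · have h0 : (x == 0) = false := by simp; omega
      have hnp : ¬ (x > 0) := by omega
      simp [aStep, List.filter_cons, hnp, hx, ih, h0, List.append_assoc]
    · subst hx; simp [aStep, List.filter_cons, ih]
    · have h0 : (x == 0) = false := by simp; omega
      have hnn : ¬ (x < 0) := by omega
      simp [aStep, List.filter_cons, hx, hnn, ih, h0, List.append_assoc]

lemma bFold (xs : List Int) : ∀ t c mo hp hz,
    xs.foldl bStep (t, c, mo, hp, hz) =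
      (t * (xs.filter (fun x => !(x == 0))).prod,
       c + ((xs.filter (fun x => decide (x < 0))).length : Int),
       (xs.filter (fun x => decide (x < 0))).foldl mupd mo,
       hp || !(xs.filter (fun x => decide (0 < x))).isEmpty,
       hz || xs.any (fun x => x == 0)) := by
  induction xs with
  | nil => intro t c mo hp hz; simp [bStep]
  | cons x t ih =>
    intro t0 c mo hp hz
    rw [List.foldl_cons]
    rcases lt_trichotomy x 0 with hx | hx | hx
    · have h0 : (x == 0) = false := by simp; omega
      have hne : ¬ x = 0 := by omega
      rw [show bStep (t0, c, mo, hp, hz) x =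
            (t0 * x, c + 1, mupd mo x, hp, hz) by
          simp [bStep, mupd, hne, hx]]
      rw [ih]
      have hnp : ¬ (0 < x) := by omega
      simp [hx, hnp, h0, mul_assoc]
      omega
    · subst hx
      rw [show bStep (t0, c, mo, hp, hz) 0 = (t0, c, mo, hp, true) by simp [bStep]]
      rw [ih]
      simp
    · have h0 : (x == 0) = false := by simp; omega
      have hnn : ¬ (x < 0) := by omega
      have hne : ¬ x = 0 := by omega
      rw [show bStep (t0, c, mo, hp, hz) x = (t0 * x, c, mo, true, hz) by
          simp [bStep, hne, hnn]]
      rw [ih]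
      simp [hx, hnn, h0, mul_assoc]

lemma foldl_mupd_some (l : List Int) : ∀ m, l.foldl mupd (some m) = some (l.foldl max m) := by
  induction l with
  | nil => intro m; rfl
  | cons x t ih =>
    intro m
    have : mupd (some m) x = some (max m x) := by
      simp only [mupd]
      rcases le_or_gt x m with h | h
      · rw [if_neg (by omega), max_eq_left h]
      · rw [if_pos (by omega), max_eq_right (le_of_lt h)]
    rw [List.foldl_cons, this, ih, List.foldl_cons]

lemma foldl_mupd_none (l : List Int) :
    l.foldl mupd none = PySem.List.max? l (fun y => y) := by
  cases l with
  | nil => rfl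
  | cons x t =>
    rw [List.foldl_cons]
    show t.foldl mupd (some x) = _
    rw [foldl_mupd_some, PySem.List.max?_id_cons]

-- the nonzero elements are, up to permutation, positives then negatives
lemma filter_nz_perm (xs : List Int) :
    (xs.filter (fun x => !(x == 0))).Perm
      (xs.filter (fun x => decide (0 < x)) ++ xs.filter (fun x => decide (x < 0))) := by
  induction xs with
  | nil => simp
  | cons x t ih =>
    rcases lt_trichotomy x 0 with hx | hx | hx
    · simp only [List.filter_cons, (by simp; omega : (!(x == 0)) = true),
        (by simp; omega : decide (0 < x) = false), (by simp [hx] : decide (x < 0) = true),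
        if_true]
      exact (ih.cons x).trans List.perm_middle.symm
    · subst hx; simpa using ih
    · simp only [List.filter_cons, (by simp; omega : (!(x == 0)) = true),
        (by simp [hx] : decide (0 < x) = true), (by simp; omega : decide (x < 0) = false),
        if_true, List.cons_append]
      exact ih.cons x

-- exact division: (a * b) // b = a for b ≠ 0
lemma floordiv_mul_cancel (a b : Int) (hb : b ≠ 0) : PySem.Int.floordiv (a * b) b = a := by
  have hmod : PySem.Int.mod (a * b) b = 0 :=
    (PySem.Int.mod_eq_zero_iff_dvd (a * b) b).mpr ⟨a, mul_comm a b⟩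
  have h := PySem.Int.floordiv_mul_add_mod (a * b) b
  rw [hmod, add_zero] at h
  exact mul_right_cancel₀ hb h

-- the last element of the ascending sort of a nonempty list is its maximum,
-- and the sorted list splits as dropLast ++ [max]
lemma sorted_split_max (l : List Int) (m : Int)
    (hm : PySem.List.max? l (fun y => y) = some m) :
    PySem.List.sorted l (fun x => x) false =
      (PySem.List.sorted l (fun x => x) false).dropLast ++ [m] := by
  set s := PySem.List.sorted l (fun x => x) false with hs
  have hperm : s.Perm l := PySem.List.sorted_perm l (fun x => x) false
  have hne : s ≠ [] := by
    intro h
    rw [PySem.List.sorted_eq_nil_iff] at h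
    subst h
    simp [PySem.List.max?] at hm
  have hL : s = s.dropLast ++ [s.getLast hne] := (List.dropLast_append_getLast hne).symm
  have hpw : s.Pairwise (fun a b => a ≤ b) := by
    have := PySem.List.sorted_pairwise l (fun x => x)
    simpa using this
  -- every element of s is ≤ its last element
  have hlast_max : ∀ y ∈ s, y ≤ s.getLast hne := by
    intro y hy
    rw [hL] at hpw hy
    rcases List.mem_append.mp hy with h | h
    · exact (List.pairwise_append.mp hpw).2.2 y h _ (List.mem_singleton_self _)
    · simp at h; omega
  have hmem : s.getLast hne ∈ l := hperm.mem_iff.mp (List.getLast_mem hne)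
  have h1 : s.getLast hne ≤ m := PySem.List.max?_isMax hm _ hmem
  have h2 : m ≤ s.getLast hne := hlast_max m (hperm.mem_iff.mpr (PySem.List.max?_mem hm))
  have : s.getLast hne = m := le_antisymm h1 h2
  rw [← this]; exact hL

lemma foldl_mul_one (l : List Int) : l.foldl (fun r num => r * num) 1 = l.prod := by
  rw [List.prod_eq_foldl]

-- main-case value equality: dividing the full nonzero product by the max negative
-- equals multiplying positives with the sorted negatives minus their last element
lemma main_case_eq (xs : List Int)
    (pos neg : List Int)
    (hpos : pos = xs.filter (fun x => decide (0 < x)))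
    (hneg : neg = xs.filter (fun x => decide (x < 0)))
    (hodd : (neg.length % 2 : Nat) = 1) :
    ∃ m, PySem.List.max? neg (fun y => y) = some m ∧
      PySem.Int.floordiv ((xs.filter (fun x => !(x == 0))).prod) m =
        (pos ++ (PySem.List.sorted neg (fun x => x) false).dropLast).prod := by
  have hne : neg ≠ [] := by intro h; rw [h] at hodd; simp at hodd
  obtain ⟨m, hm⟩ : ∃ m, PySem.List.max? neg (fun y => y) = some m := by
    rcases h : PySem.List.max? neg (fun y => y) with _ | m
    · exact absurd ((PySem.List.max?_eq_none_iff _ _).mp h) hne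
    · exact ⟨m, rfl⟩
  refine ⟨m, hm, ?_⟩
  have hmneg : m < 0 := by
    have := PySem.List.max?_mem hm
    rw [hneg] at this
    simpa using (List.mem_filter.mp this).2
  have hsplit := sorted_split_max neg m hm
  have hprodneg : neg.prod = (PySem.List.sorted neg (fun x => x) false).dropLast.prod * m := by
    calc neg.prod = (PySem.List.sorted neg (fun x => x) false).prod :=
          ((PySem.List.sorted_perm neg (fun x => x) false).prod_eq).symm
      _ = ((PySem.List.sorted neg (fun x => x) false).dropLast ++ [m]).prod := by
          rw [← hsplit]
      _ = (PySem.List.sorted neg (fun x => x) false).dropLast.prod * m := by simp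
  have hnz : (xs.filter (fun x => !(x == 0))).prod = pos.prod * neg.prod := by
    rw [hpos, hneg, ← List.prod_append]
    exact (filter_nz_perm xs).prod_eq
  rw [hnz, hprodneg, ← mul_assoc,
    floordiv_mul_cancel _ m (by omega), List.prod_append]

-- the two main-case branches (product of pos ++ kept negatives vs corrected total) agree
lemma tails_eq (xs : List Int) (pos neg : List Int)
    (hpos : pos = xs.filter (fun x => decide (0 < x)))
    (hneg : neg = xs.filter (fun x => decide (x < 0))) :
    PySem.Int.toStr ((pos ++
        (if PySem.Int.mod (neg.length : Int) 2 ≠ 0 then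
          PySem.List.slice (PySem.List.sorted neg (fun x => x) false) none
            (some ((neg.length : Int) - 1))
        else neg)).foldl (fun r num => r * num) 1) =
    (if PySem.Int.mod (neg.length : Int) 2 ≠ 0 then
        match neg.foldl mupd none with
        | some m => PySem.Int.toStr (PySem.Int.floordiv ((xs.filter (fun x => !(x == 0))).prod) m)
        | none => ""
      else PySem.Int.toStr ((xs.filter (fun x => !(x == 0))).prod)) := by
  have hmod : PySem.Int.mod (neg.length : Int) 2 = ((neg.length % 2 : Nat) : Int) := by
    exact_mod_cast PySem.Int.mod_natCast neg.length 2
  by_cases hodd : (neg.length % 2 : Nat) = 1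
  · obtain ⟨m, hm, heq⟩ := main_case_eq xs pos neg hpos hneg hodd
    have hc : PySem.Int.mod (neg.length : Int) 2 ≠ 0 := by rw [hmod, hodd]; simp
    rw [if_pos hc, if_pos hc, foldl_mupd_none, hm]
    have hslice : PySem.List.slice (PySem.List.sorted neg (fun x => x) false) none
        (some ((neg.length : Int) - 1)) =
        (PySem.List.sorted neg (fun x => x) false).dropLast := by
      have hcast : ((neg.length : Int) - 1) = ((neg.length - 1 : Nat) : Int) := by
        push_cast [Nat.cast_sub (by omega : 1 ≤ neg.length)]; ring
      rw [hcast, PySem.List.slice_to_natCast, List.dropLast_eq_take,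
        PySem.List.length_sorted]
    rw [hslice, foldl_mul_one, ← heq]
  · have hc : ¬ (PySem.Int.mod (neg.length : Int) 2 ≠ 0) := by rw [hmod]; omega
    rw [if_neg hc, if_neg hc, foldl_mul_one, hpos, hneg]
    exact congrArg PySem.Int.toStr ((filter_nz_perm xs).prod_eq).symm

-- ===== VERDICT (by name: the statement is the Claim_ definition above) =====
theorem solution_spec : Claim_equal_solution := by
  intro xs _
  unfold Spec_solution solution solution_alt
  rw [aFold, bFold]
  simp only [List.nil_append, Bool.false_or, zero_add, one_mul]
  obtain ⟨pos, hpos⟩ : ∃ p, p = xs.filter (fun x => decide (0 < x)) := ⟨_, rfl⟩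
  obtain ⟨neg, hneg⟩ : ∃ nn, nn = xs.filter (fun x => decide (x < 0)) := ⟨_, rfl⟩
  rw [← hpos, ← hneg]
  by_cases hp : pos = []
  · by_cases h0 : neg = []
    · simp [hp, h0]
    · by_cases h1 : neg.length = 1
      · obtain ⟨v, hv⟩ := List.length_eq_one_iff.mp h1
        subst hv
        simp [hp, PySem.List.pyGetD, PySem.List.pyGet?, PySem.List.pyIdx?,
          List.foldl_cons, mupd]
      · have hne0 : neg.length ≠ 0 := fun h => h0 (List.length_eq_zero_iff.mp h)
        have hA1 : ¬ (pos.length = 0 ∧ neg.length = 0) := by simp [hp]; omega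
        have hA2 : ¬ (pos.length = 0 ∧ neg.length = 1) := by simp [hp]; omega
        have hB1 : ¬ ((!pos.isEmpty) = false ∧ (neg.length : Int) = 0) := by
          simp [hp]; omega
        have hB2 : ¬ ((!pos.isEmpty) = false ∧ (neg.length : Int) = 1) := by
          simp [hp]; omega
        rw [if_neg hA1, if_neg hA2, if_neg hB1, if_neg hB2]
        exact tails_eq xs pos neg hpos hneg
  · have hpe : pos.isEmpty = false := by
      cases pos with
      | nil => exact absurd rfl hp
      | cons a t => rfl
    have hl : pos.length ≠ 0 := fun h => hp (List.length_eq_zero_iff.mp h)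
    have hA1 : ¬ (pos.length = 0 ∧ neg.length = 0) := by omega
    have hA2 : ¬ (pos.length = 0 ∧ neg.length = 1) := by omega
    have hB1 : ¬ ((!pos.isEmpty) = false ∧ (neg.length : Int) = 0) := by
      simp [hpe]
    have hB2 : ¬ ((!pos.isEmpty) = false ∧ (neg.length : Int) = 1) := by
      simp [hpe]
    rw [if_neg hA1, if_neg hA2, if_neg hB1, if_neg hB2]
    exact tails_eq xs pos neg hpos hneg
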